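-- pv_equiv track=rewrite | github.com/Ernest-e/PyHW | homework4/task2.py | simplemults
-- ===== SOURCE A (Python) =====
-- def simplemults(n):
--     res = []
--     for i in range(1, n):
--         if n % i == 0:
--             if i not in res:
--                 res.append(i)
--             n = n//i
--
--     return res
-- ===== SOURCE B (Python) =====
-- def _least_div_from(m, i):
--     # least divisor of m that is >= i, found by sqrt-bounded divisor-pair enumeration
--     best = m
--     j = 1
--     while j * j <= m:
--         if m % j == 0:
--             if i <= j < best:
--                 best = j
--             c = m // j
--             if i <= c < best:
--                 best = c
--         j += 1
--     return best
--
--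
-- def simplemults(n):
--     if n < 2:
--         return []
--     res = [1]
--     m, i = n, 2
--     while m > 1 and i <= m:
--         d = _least_div_from(m, i)
--         if d >= n:
--             break
--         res.append(d)
--         m //= d
--         i = d + 1
--     return res
-- ===== Notes on version B (the rewrite author's own statement) =====
-- stated objective: faster
-- what changed: A scans every i in range(1, n) testing divisibility; B jumps directly from one chain element to the next by finding the least divisor >= i of the current m via sqrt-bounded divisor-pair enumeration.
import Mathlib
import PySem

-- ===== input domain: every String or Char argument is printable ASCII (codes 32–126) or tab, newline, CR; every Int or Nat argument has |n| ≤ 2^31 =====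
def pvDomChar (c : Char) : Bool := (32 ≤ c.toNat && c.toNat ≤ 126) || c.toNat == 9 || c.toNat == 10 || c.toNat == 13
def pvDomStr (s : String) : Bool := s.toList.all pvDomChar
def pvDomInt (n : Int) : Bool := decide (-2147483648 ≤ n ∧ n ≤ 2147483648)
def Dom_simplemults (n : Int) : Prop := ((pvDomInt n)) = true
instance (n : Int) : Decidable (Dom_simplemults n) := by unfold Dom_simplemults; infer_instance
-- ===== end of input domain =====

-- B replaces A's single scan over range(1, n) by repeatedly locating the least divisor ≥ i
-- through sqrt-bounded divisor-pair enumeration (objective: faster).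

-- ===== PORT A =====
-- loop body of A: if n % i == 0: (append i if fresh) and n //= i ; state st = (res, current n)
def fA (st : List Int × Int) (i : Int) : List Int × Int :=
  if PySem.Int.mod st.2 i = 0 then
    ((if i ∈ st.1 then st.1 else st.1 ++ [i]), PySem.Int.floordiv st.2 i)
  else st

-- literal port of A: one pass i = 1 .. n-1 over the ORIGINAL n
def simplemults (n : Int) : List Int :=
  ((PySem.List.pyRange 1 n 1).foldl fA ([], n)).1

-- ===== PORT B =====
-- body of Source B `_least_div_from`'s while loop: consider the divisor pair (j, m//j)
def bUpdate (m i j best : Int) : Int :=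
  if PySem.Int.mod m j = 0 then
    let b1 := if i ≤ j ∧ j < best then j else best
    let c := PySem.Int.floordiv m j
    if i ≤ c ∧ c < b1 then c else b1
  else best

-- the while loop itself: j ascends while j*j ≤ m, keeping the least divisor ≥ i seen
def bLoopJ (m i : Int) (j best : Int) : Int :=
  if h : j * j ≤ m then bLoopJ m i (j + 1) (bUpdate m i j best)
  else best
termination_by (m + 1 - j).toNat
decreasing_by
  have hj : j ≤ m := by
    by_cases h0 : j ≤ 0
    · nlinarith
    · nlinarith
  omega

def bLeastDivFrom (m i : Int) : Int := bLoopJ m i 1 m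

-- port of Source B's outer while loop (fuel = n.toNat bounds the number of iterations;
-- m strictly decreases each step, so the fuel is never exhausted on admitted inputs)
def bChain (nn : Int) (fuel : Nat) (i m : Int) (res : List Int) : List Int :=
  match fuel with
  | 0 => res
  | fuel + 1 =>
    if 1 < m ∧ i ≤ m then
      let d := bLeastDivFrom m i
      if nn ≤ d then res
      else bChain nn fuel (d + 1) (PySem.Int.floordiv m d) (res ++ [d])
    else res

def simplemults_alt (n : Int) : List Int :=
  if n < 2 then [] else bChain n n.toNat 2 n [1]

-- ===== PRECONDITION & SPEC =====
def Spec_simplemults (n : Int) (out : List Int) : Prop := out = simplemults_alt n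
instance (n : Int) (out : List Int) : Decidable (Spec_simplemults n out) := by unfold Spec_simplemults; infer_instance

-- ===== CLAIM (what is proved, stated in full; the proofs are below) =====
def Claim_equal_simplemults : Prop := ∀ (n : Int), Dom_simplemults n → Spec_simplemults n (simplemults n)

-- ===== LEMMAS AND PROOFS =====

-- reference chain: greedy divisor stripping for indices i .. N-1 (what A's loop appends after i)
def chainA (N i m : Int) : List Int :=
  if h : i < N then
    if PySem.Int.mod m i = 0 then i :: chainA N (i + 1) (PySem.Int.floordiv m i)
    else chainA N (i + 1) m
  else []
termination_by (N - i).toNat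
decreasing_by all_goals omega

theorem chainA_nil (N i m : Int) (h : ∀ j, i ≤ j → j < N → ¬ j ∣ m) : chainA N i m = [] := by
  rw [chainA]
  by_cases hiN : i < N
  · rw [dif_pos hiN, if_neg, chainA_nil N (i + 1) m (fun j hj hjN => h j (by omega) hjN)]
    rw [PySem.Int.mod_eq_zero_iff_dvd]
    exact h i le_rfl hiN
  · rw [dif_neg hiN]
termination_by (N - i).toNat
decreasing_by omega

theorem foldA (N : Int) (i m : Int) (res : List Int) (hres : ∀ x ∈ res, x < i) :
    ((PySem.List.pyRange i N 1).foldl fA (res, m)).1 = res ++ chainA N i m := by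
  by_cases h : i < N
  · rw [PySem.List.pyRange_one_cons h, List.foldl_cons, chainA, dif_pos h]
    have hmem : i ∉ res := fun hx => absurd (hres i hx) (lt_irrefl i)
    by_cases hdvd : PySem.Int.mod m i = 0
    · rw [show fA (res, m) i = (res ++ [i], PySem.Int.floordiv m i) by
        simp [fA, hdvd, hmem]]
      rw [foldA N (i + 1) (PySem.Int.floordiv m i) (res ++ [i])
        (by intro x hx; rcases List.mem_append.mp hx with h1 | h1
            · have := hres x h1; omega
            · simp at h1; omega)]
      rw [if_pos hdvd]
      simp
    · rw [show fA (res, m) i = (res, m) by simp [fA, hdvd]]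
      rw [foldA N (i + 1) m res (by intro x hx; have := hres x hx; omega), if_neg hdvd]
  · rw [PySem.List.pyRange_one_eq_nil (by omega), chainA, dif_neg h]
    simp
termination_by (N - i).toNat
decreasing_by all_goals omega

theorem cofac {m d : Int} (hm : 0 < m) (hd : 0 < d) (hdvd : d ∣ m) :
    0 < m / d ∧ m / d ∣ m ∧ m / (m / d) = d ∧ d * (m / d) = m := by
  obtain ⟨c, hc⟩ := hdvd
  have hd0 : d ≠ 0 := by omega
  have hcd : m / d = c := by rw [hc, Int.mul_ediv_cancel_left _ hd0]
  have hc0 : 0 < c := by nlinarith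
  refine ⟨by omega, ⟨d, by rw [hcd]; linarith [hc]⟩, ?_, by rw [hcd]; omega⟩
  rw [hcd, hc, mul_comm]
  exact Int.mul_ediv_cancel_left d (by omega)

theorem bUpdate_spec (m i j best : Int) (hm : 0 < m) (hi : 1 ≤ i) (hj : 1 ≤ j)
    (hjj : j * j ≤ m) (hb1 : best ∣ m) (hb2 : i ≤ best)
    (hinv : ∀ d, d ∣ m → i ≤ d → d < best → j ≤ d ∧ j ≤ m / d) :
    bUpdate m i j best ∣ m ∧ i ≤ bUpdate m i j best ∧
      ∀ d, d ∣ m → i ≤ d → d < bUpdate m i j best → j + 1 ≤ d ∧ j + 1 ≤ m / d := by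
  rw [bUpdate]
  by_cases hjd : PySem.Int.mod m j = 0
  · have hjm : j ∣ m := (PySem.Int.mod_eq_zero_iff_dvd m j).mp hjd
    have hco := cofac hm (by omega) hjm
    rw [if_pos hjd]
    have hfd : PySem.Int.floordiv m j = m / j := PySem.Int.floordiv_eq_ediv_of_pos (by omega)
    simp only [hfd]
    -- r is the chosen candidate after both comparisons
    set b1 := if i ≤ j ∧ j < best then j else best with hb1def
    set r := if i ≤ m / j ∧ m / j < b1 then m / j else b1 with hrdef
    have hb1dvd : b1 ∣ m := by rw [hb1def]; split_ifs with h1; exacts [hjm, hb1]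
    have hb1i : i ≤ b1 := by rw [hb1def]; split_ifs with h1; exacts [h1.1, hb2]
    have hb1le : b1 ≤ best := by rw [hb1def]; split_ifs with h1; exacts [le_of_lt h1.2, le_rfl]
    have hb1j : i ≤ j → b1 ≤ j := by
      intro hij; rw [hb1def]; split_ifs with h1
      · exact le_rfl
      · push_neg at h1; exact h1 hij
    have hrdvd : r ∣ m := by rw [hrdef]; split_ifs with h1; exacts [hco.2.1, hb1dvd]
    have hri : i ≤ r := by rw [hrdef]; split_ifs with h1; exacts [h1.1, hb1i]
    have hrle : r ≤ b1 := by rw [hrdef]; split_ifs with h1; exacts [le_of_lt h1.2, le_rfl]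
    have hrc : i ≤ m / j → r ≤ m / j := by
      intro hic; rw [hrdef]; split_ifs with h1
      · exact le_rfl
      · push_neg at h1; exact h1 hic
    refine ⟨hrdvd, hri, ?_⟩
    intro d hd hid hdr
    have hdbest : d < best := lt_of_lt_of_le hdr (le_trans hrle hb1le)
    obtain ⟨h1, h2⟩ := hinv d hd hid hdbest
    have hd0 : 0 < d := by omega
    have hcod := cofac hm hd0 hd
    constructor
    · -- d ≠ j
      rcases lt_or_eq_of_le h1 with h | h
      · omega
      · exfalso; have := hb1j (by omega); omega
    · -- m / d ≠ j
      rcases lt_or_eq_of_le h2 with h | h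
      · omega
      · exfalso
        have hdc : d = m / j := by rw [h]; exact hcod.2.2.1.symm
        have := hrc (hdc ▸ hid)
        omega
  · rw [if_neg hjd]
    have hjm : ¬ j ∣ m := fun hdd => hjd ((PySem.Int.mod_eq_zero_iff_dvd m j).mpr hdd)
    refine ⟨hb1, hb2, ?_⟩
    intro d hd hid hdb
    obtain ⟨h1, h2⟩ := hinv d hd hid hdb
    have hd0 : 0 < d := by omega
    have hcod := cofac hm hd0 hd
    constructor
    · rcases lt_or_eq_of_le h1 with h | h
      · omega
      · exact absurd (h ▸ hd) hjm
    · rcases lt_or_eq_of_le h2 with h | h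
      · omega
      · exfalso; exact hjm (h ▸ hcod.2.1)
theorem bLoopJ_spec (m i : Int) (hm : 0 < m) (hi : 1 ≤ i) (j best : Int) (hj : 1 ≤ j)
    (hb1 : best ∣ m) (hb2 : i ≤ best)
    (hinv : ∀ d, d ∣ m → i ≤ d → d < best → j ≤ d ∧ j ≤ m / d) :
    bLoopJ m i j best ∣ m ∧ i ≤ bLoopJ m i j best ∧
      ∀ d, d ∣ m → i ≤ d → bLoopJ m i j best ≤ d := by
  rw [bLoopJ]
  by_cases hjj : j * j ≤ m
  · rw [dif_pos hjj]
    obtain ⟨u1, u2, u3⟩ := bUpdate_spec m i j best hm hi hj hjj hb1 hb2 hinv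
    exact bLoopJ_spec m i hm hi (j + 1) _ (by omega) u1 u2 u3
  · rw [dif_neg hjj]
    refine ⟨hb1, hb2, ?_⟩
    intro d hd hid
    by_contra hlt
    push_neg at hlt
    obtain ⟨h1, h2⟩ := hinv d hd hid hlt
    have hd0 : 0 < d := by omega
    have := (cofac hm hd0 hd).2.2.2
    nlinarith
termination_by (m + 1 - j).toNat
decreasing_by
  have hjm : j ≤ m := by
    by_cases h0 : j ≤ 0
    · nlinarith
    · nlinarith
  omega

theorem bLeast_spec (m i : Int) (hm : 0 < m) (hi : 1 ≤ i) (him : i ≤ m) :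
    bLeastDivFrom m i ∣ m ∧ i ≤ bLeastDivFrom m i ∧
      ∀ d, d ∣ m → i ≤ d → bLeastDivFrom m i ≤ d := by
  rw [bLeastDivFrom]
  refine bLoopJ_spec m i hm hi 1 m le_rfl dvd_rfl him ?_
  intro d hd hid _
  have hd0 : 0 < d := by omega
  exact ⟨by omega, (cofac hm hd0 hd).1⟩

theorem chainA_least (N i m d : Int) (hi : 1 ≤ i) (hm : 0 < m)
    (hd : d ∣ m) (hid : i ≤ d) (hdN : d < N)
    (hmin : ∀ e, e ∣ m → i ≤ e → d ≤ e) :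
    chainA N i m = d :: chainA N (d + 1) (PySem.Int.floordiv m d) := by
  have hiN : i < N := by omega
  rw [chainA, dif_pos hiN]
  by_cases hdvd : PySem.Int.mod m i = 0
  · have him : i ∣ m := (PySem.Int.mod_eq_zero_iff_dvd m i).mp hdvd
    have hdi : d = i := le_antisymm (hmin i him le_rfl) hid
    rw [if_pos hdvd, hdi]
  · have hne : ¬ i ∣ m := fun hdd => hdvd ((PySem.Int.mod_eq_zero_iff_dvd m i).mpr hdd)
    have hi' : i + 1 ≤ d := by
      rcases lt_or_eq_of_le hid with h | h
      · omega
      · exact absurd (h ▸ hd) hne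
    rw [if_neg hdvd]
    exact chainA_least N (i + 1) m d (by omega) hm hd hi' hdN
      (fun e he hie => hmin e he (by omega))
termination_by (N - i).toNat
decreasing_by omega

theorem bChain_eq (N : Int) (fuel : Nat) (i m : Int) (res : List Int)
    (hi : 2 ≤ i) (hm : 1 ≤ m) (hfuel : m.toNat ≤ fuel) :
    bChain N fuel i m res = res ++ chainA N i m := by
  match fuel with
  | 0 => omega
  | fuel + 1 =>
    rw [bChain]
    by_cases hc : 1 < m ∧ i ≤ m
    · rw [if_pos hc]
      have hm0 : 0 < m := by omega
      obtain ⟨hd1, hd2, hd3⟩ := bLeast_spec m i hm0 (by omega) hc.2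
      by_cases hdN : N ≤ bLeastDivFrom m i
      · rw [if_pos hdN, chainA_nil N i m ?_]
        · simp
        · intro j hj hjN hdvd
          have := hd3 j hdvd hj
          omega
      · rw [if_neg hdN]
        have hd0 : 0 < bLeastDivFrom m i := by omega
        have hco := cofac hm0 hd0 hd1
        have hfd : PySem.Int.floordiv m (bLeastDivFrom m i) = m / bLeastDivFrom m i :=
          PySem.Int.floordiv_eq_ediv_of_pos hd0
        have hqlt : m / bLeastDivFrom m i < m := by nlinarith [hco.1, hco.2.2.2]
        rw [bChain_eq N fuel (bLeastDivFrom m i + 1) (PySem.Int.floordiv m (bLeastDivFrom m i))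
          (res ++ [bLeastDivFrom m i]) (by omega) (by rw [hfd]; omega) (by rw [hfd]; omega)]
        rw [chainA_least N i m (bLeastDivFrom m i) (by omega) hm0 hd1 hd2 (by omega) hd3]
        simp
    · rw [if_neg hc]
      rw [chainA_nil N i m ?_]
      · simp
      · intro j hj hjN hdvd
        have hjm : j ≤ m := Int.le_of_dvd (by omega) hdvd
        push_neg at hc
        by_cases h1 : 1 < m
        · have := hc h1; omega
        · omega

-- ===== VERDICT (by name: the statement is the Claim_ definition above) =====
theorem simplemults_spec : Claim_equal_simplemults := by
  intro n _
  unfold Spec_simplemults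
  have hA : simplemults n = chainA n 1 n := by
    rw [simplemults, foldA n 1 n [] (by simp)]
    simp
  by_cases h2 : n < 2
  · rw [hA, simplemults_alt, if_pos h2, chainA_nil n 1 n (by intro j hj hjN _; omega)]
  · have h2' : (2:Int) ≤ n := by omega
    have hstep : chainA n 1 n = 1 :: chainA n 2 n := by
      rw [chainA, dif_pos (by omega : (1:Int) < n),
        if_pos ((PySem.Int.mod_eq_zero_iff_dvd n 1).mpr (one_dvd n))]
      have : PySem.Int.floordiv n 1 = n := by
        rw [PySem.Int.floordiv_eq_ediv_of_pos (by omega), Int.ediv_one]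
      rw [this]
      norm_num
    rw [hA, hstep, simplemults_alt, if_neg h2,
      bChain_eq n n.toNat 2 n [1] le_rfl (by omega) le_rfl]
    simp
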